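-- pv_equiv track=rewrite | github.com/StMarkFx/MisterHR | backend/agents/matching_agent.py | _identify_highest_degree
-- ===== SOURCE A (Python) =====
-- from typing import Dict, Any, List, Optional, Tuple
--
-- def _identify_highest_degree(education: List[Dict[str, Any]]) -> Optional[str]:
--     """Identify the highest degree from education list."""
--     degree_hierarchy = {
--         'phd': 5, 'doctorate': 5,
--         'masters': 4, "master's": 4,
--         'bachelor': 3, "bachelor's": 3,
--         'associate': 2,
--         'certificate': 1
--     }
--
--     highest_degree = None
--     highest_level = 0
--
--     for ed in education:
--         degree = ed.get('degree', '').lower()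
--         for deg_name, level in degree_hierarchy.items():
--             if deg_name in degree and level > highest_level:
--                 highest_degree = ed.get('degree')
--                 highest_level = level
--
--     return highest_degree
-- ===== SOURCE B (Python) =====
-- from typing import Dict, Any, List, Optional
--
-- _LEVEL_NAMES = [
--     (5, ('phd', 'doctorate')),
--     (4, ('masters', "master's")),
--     (3, ('bachelor', "bachelor's")),
--     (2, ('associate',)),
--     (1, ('certificate',)),
-- ]
--
-- def _identify_highest_degree(education: List[Dict[str, Any]]) -> Optional[str]:
--     """Level-descending search: try each hierarchy level from highest to lowest
--     and return the first entry matching a name at that level."""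
--     for _level, names in _LEVEL_NAMES:
--         for ed in education:
--             low = ed.get('degree', '').lower()
--             if any(name in low for name in names):
--                 return ed.get('degree')
--     return None
-- ===== Notes on version B (the rewrite author's own statement) =====
-- stated objective: alternative
-- what changed: Replaces A's single max-tracking scan (mutable highest_degree/highest_level over a name->level dict) with an early-returning level-descending search over a prebuilt level->names table: for each level 5..1 it returns the first education entry whose degree contains a name of that level.
import Mathlib
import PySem

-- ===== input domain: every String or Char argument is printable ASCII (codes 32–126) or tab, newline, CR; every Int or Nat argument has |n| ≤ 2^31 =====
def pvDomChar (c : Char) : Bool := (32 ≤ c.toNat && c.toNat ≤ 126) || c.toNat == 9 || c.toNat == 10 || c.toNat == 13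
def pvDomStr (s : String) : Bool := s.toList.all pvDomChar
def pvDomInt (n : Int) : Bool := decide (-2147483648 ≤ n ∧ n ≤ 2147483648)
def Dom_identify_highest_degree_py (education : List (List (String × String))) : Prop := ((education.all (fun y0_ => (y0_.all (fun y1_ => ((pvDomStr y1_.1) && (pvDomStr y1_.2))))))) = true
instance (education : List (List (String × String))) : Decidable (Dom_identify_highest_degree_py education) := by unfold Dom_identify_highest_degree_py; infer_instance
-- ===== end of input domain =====

-- B replaces A's max-tracking scan with a level-descending, early-returning search
-- over a level→names table (alternative decomposition, same asymptotic cost).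

-- shared dict primitive: ed.get('degree') (Python dict built from the pairs: last duplicate key wins)
def pvDictGet? (ed : List (String × String)) (k : String) : Option String :=
  (PySem.Dict.ofList ed).get? k

-- ===== PORT A =====
def pvDegreeHierarchy : List (String × Int) :=
  [("phd", 5), ("doctorate", 5), ("masters", 4), ("master's", 4),
   ("bachelor", 3), ("bachelor's", 3), ("associate", 2), ("certificate", 1)]

def identify_highest_degree_py (education : List (List (String × String))) : Option String :=
  (education.foldl
    (fun (st : Option String × Int) ed =>
      let degree := PySem.Str.lower ((pvDictGet? ed "degree").getD "")
      pvDegreeHierarchy.foldl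
        (fun st2 p =>
          if PySem.Str.isIn p.1 degree = true ∧ st2.2 < p.2 then (pvDictGet? ed "degree", p.2) else st2)
        st)
    ((none : Option String), (0 : Int))).1

-- ===== PORT B =====
def pvLevelNames : List (Int × List String) :=
  [(5, ["phd", "doctorate"]), (4, ["masters", "master's"]),
   (3, ["bachelor", "bachelor's"]), (2, ["associate"]), (1, ["certificate"])]

def pvEntryMatch (names : List String) (ed : List (String × String)) : Bool :=
  names.any (fun n => PySem.Str.isIn n (PySem.Str.lower ((pvDictGet? ed "degree").getD "")))

def pvGoLevels (education : List (List (String × String))) :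
    List (Int × List String) → Option String
  | [] => none
  | (_, names) :: rest =>
    match education.find? (pvEntryMatch names) with
    | some ed => pvDictGet? ed "degree"
    | none => pvGoLevels education rest

def identify_highest_degree_py_alt (education : List (List (String × String))) : Option String :=
  pvGoLevels education pvLevelNames

-- ===== PRECONDITION & SPEC =====
def Spec_identify_highest_degree_py (education : List (List (String × String))) (out : Option String) : Prop := out = identify_highest_degree_py_alt education
instance (education : List (List (String × String))) (out : Option String) : Decidable (Spec_identify_highest_degree_py education out) := by unfold Spec_identify_highest_degree_py; infer_instance

-- ===== CLAIM (what is proved, stated in full; the proofs are below) =====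
def Claim_equal_identify_highest_degree_py : Prop := ∀ (education : List (List (String × String))), Dom_identify_highest_degree_py education → Spec_identify_highest_degree_py education (identify_highest_degree_py education)

-- ===== LEMMAS AND PROOFS =====

-- the level achieved by a single entry (highest matching hierarchy level, 0 if none)
def pvM (ed : List (String × String)) : Int :=
  if pvEntryMatch ["phd", "doctorate"] ed then 5
  else if pvEntryMatch ["masters", "master's"] ed then 4
  else if pvEntryMatch ["bachelor", "bachelor's"] ed then 3
  else if pvEntryMatch ["associate"] ed then 2
  else if pvEntryMatch ["certificate"] ed then 1
  else 0

-- B's search restricted to levels strictly above h; 'some r' = found, r = that entry's degree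
def pvAboveO (h : Int) (education : List (List (String × String))) :
    List (Int × List String) → Option (Option String)
  | [] => none
  | (l, names) :: rest =>
    if h < l then
      match education.find? (pvEntryMatch names) with
      | some ed => some (pvDictGet? ed "degree")
      | none => pvAboveO h education rest
    else pvAboveO h education rest

-- highest matching level in a hierarchy suffix, for predicate c
def pvMaxR (c : String → Bool) : List (String × Int) → Int
  | [] => 0
  | p :: ps => if c p.1 then max p.2 (pvMaxR c ps) else pvMaxR c ps

theorem pv_gen (c : String → Bool) (g : Option String) :
    ∀ (ps : List (String × Int)) (d : Option String) (h : Int), 0 ≤ h →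
      ps.foldl (fun st2 p => if c p.1 = true ∧ st2.2 < p.2 then (g, p.2) else st2) (d, h)
        = if h < pvMaxR c ps then (g, pvMaxR c ps) else (d, h) := by
  intro ps
  induction ps with
  | nil =>
    intro d h h0
    rw [List.foldl_nil, pvMaxR, if_neg (by omega)]
  | cons p ps ih =>
    intro d h h0
    rw [List.foldl_cons]
    by_cases hc : c p.1
    · by_cases hlt : h < p.2
      · rw [if_pos ⟨hc, hlt⟩, ih g p.2 (by omega)]
        simp only [pvMaxR, hc, if_pos]
        split_ifs <;> simp [Prod.mk.injEq] <;> omega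
      · rw [if_neg (by simp [hlt]), ih d h h0]
        simp only [pvMaxR, hc, if_pos]
        split_ifs <;> simp [Prod.mk.injEq] <;> omega
    · rw [if_neg (by simp [hc]), ih d h h0]
      simp only [pvMaxR, hc, if_neg, Bool.false_eq_true, if_false]

theorem pv_maxR_eq (ed : List (String × String)) :
    pvMaxR (fun n => PySem.Str.isIn n (PySem.Str.lower ((pvDictGet? ed "degree").getD ""))) pvDegreeHierarchy
      = pvM ed := by
  simp only [pvDegreeHierarchy, pvMaxR, pvM, pvEntryMatch, List.any_cons, List.any_nil, Bool.or_false]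
  cases hb1 : PySem.Str.isIn "phd" (PySem.Str.lower ((pvDictGet? ed "degree").getD "")) <;>
  cases hb2 : PySem.Str.isIn "doctorate" (PySem.Str.lower ((pvDictGet? ed "degree").getD "")) <;>
  cases hb3 : PySem.Str.isIn "masters" (PySem.Str.lower ((pvDictGet? ed "degree").getD "")) <;>
  cases hb4 : PySem.Str.isIn "master's" (PySem.Str.lower ((pvDictGet? ed "degree").getD "")) <;>
  cases hb5 : PySem.Str.isIn "bachelor" (PySem.Str.lower ((pvDictGet? ed "degree").getD "")) <;>
  cases hb6 : PySem.Str.isIn "bachelor's" (PySem.Str.lower ((pvDictGet? ed "degree").getD "")) <;>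
  cases hb7 : PySem.Str.isIn "associate" (PySem.Str.lower ((pvDictGet? ed "degree").getD "")) <;>
  cases hb8 : PySem.Str.isIn "certificate" (PySem.Str.lower ((pvDictGet? ed "degree").getD "")) <;>
    norm_num

theorem pvM_nonneg (ed : List (String × String)) : 0 ≤ pvM ed := by
  unfold pvM; split_ifs <;> omega

theorem pv_inner_step (ed : List (String × String)) (d : Option String) (h : Int) (h0 : 0 ≤ h) :
    pvDegreeHierarchy.foldl
        (fun st2 p =>
          if PySem.Str.isIn p.1 (PySem.Str.lower ((pvDictGet? ed "degree").getD "")) = true ∧ st2.2 < p.2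
          then (pvDictGet? ed "degree", p.2) else st2)
        (d, h)
      = if h < pvM ed then (pvDictGet? ed "degree", pvM ed) else (d, h) := by
  have H := pv_gen (fun n => PySem.Str.isIn n (PySem.Str.lower ((pvDictGet? ed "degree").getD "")))
      (pvDictGet? ed "degree") pvDegreeHierarchy d h h0
  rw [pv_maxR_eq] at H
  exact H

theorem pv_go_eq_aboveO (education : List (List (String × String))) :
    ∀ ls : List (Int × List String), (∀ p ∈ ls, (0:Int) < p.1) →
      pvGoLevels education ls = (pvAboveO 0 education ls).getD none := by
  intro ls
  induction ls with
  | nil => intro _; rfl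
  | cons p rest ih =>
    intro hpos
    obtain ⟨l, ns⟩ := p
    rw [pvGoLevels, pvAboveO, if_pos (hpos (l, ns) (by simp))]
    cases hf : education.find? (pvEntryMatch ns)
    · exact ih (fun q hq => hpos q (by simp [hq]))
    · rfl

theorem pv_alt_eq_aboveO (education : List (List (String × String))) :
    identify_highest_degree_py_alt education = (pvAboveO 0 education pvLevelNames).getD none := by
  rw [identify_highest_degree_py_alt, pv_go_eq_aboveO]
  intro p hp
  simp only [pvLevelNames, List.mem_cons, List.not_mem_nil, or_false] at hp
  rcases hp with h | h | h | h | h <;> subst h <;> norm_num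

theorem pv_le_pvM_5 (ed : List (String × String)) :
    pvEntryMatch ["phd", "doctorate"] ed = true → (5:Int) ≤ pvM ed := by
  intro hb; simp only [pvM, hb, if_pos]; omega
theorem pv_le_pvM_4 (ed : List (String × String)) :
    pvEntryMatch ["masters", "master's"] ed = true → (4:Int) ≤ pvM ed := by
  intro hb; simp only [pvM, hb]; split_ifs <;> omega
theorem pv_le_pvM_3 (ed : List (String × String)) :
    pvEntryMatch ["bachelor", "bachelor's"] ed = true → (3:Int) ≤ pvM ed := by
  intro hb; simp only [pvM, hb]; split_ifs <;> omega
theorem pv_le_pvM_2 (ed : List (String × String)) :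
    pvEntryMatch ["associate"] ed = true → (2:Int) ≤ pvM ed := by
  intro hb; simp only [pvM, hb]; split_ifs <;> omega
theorem pv_le_pvM_1 (ed : List (String × String)) :
    pvEntryMatch ["certificate"] ed = true → (1:Int) ≤ pvM ed := by
  intro hb; simp only [pvM, hb]; split_ifs <;> omega

-- when no level above h matches ed, prepending ed changes nothing
theorem pv_aboveO_cons_skip (ed : List (String × String)) (education : List (List (String × String))) (h : Int) :
    ∀ ls : List (Int × List String), (∀ p ∈ ls, h < p.1 → pvEntryMatch p.2 ed = false) →
      pvAboveO h (ed :: education) ls = pvAboveO h education ls := by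
  intro ls
  induction ls with
  | nil => intro _; rfl
  | cons p rest ih =>
    intro hskip
    obtain ⟨l, ns⟩ := p
    rw [pvAboveO, pvAboveO]
    by_cases hl : h < l
    · rw [if_pos hl, if_pos hl,
        List.find?_cons_of_neg (by simp [hskip (l, ns) (by simp) hl]),
        ih (fun q hq => hskip q (by simp [hq]))]
    · rw [if_neg hl, if_neg hl, ih (fun q hq => hskip q (by simp [hq]))]
set_option maxHeartbeats 800000 in
theorem pv_aboveO_cons (ed : List (String × String)) (education : List (List (String × String)))
    (h : Int) (h0 : 0 ≤ h) :
    pvAboveO h (ed :: education) pvLevelNames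
      = if h < pvM ed then some ((pvAboveO (pvM ed) education pvLevelNames).getD (pvDictGet? ed "degree"))
        else pvAboveO h education pvLevelNames := by
  by_cases hM : h < pvM ed
  · rw [if_pos hM]
    by_cases hb5 : pvEntryMatch ["phd", "doctorate"] ed = true
    · have hMv : pvM ed = 5 := by simp [pvM, hb5]
      rw [hMv] at hM ⊢
      simp only [pvLevelNames, pvAboveO]
      rw [if_pos (show h < 5 by omega), List.find?_cons_of_pos hb5]
      norm_num
    · have hb5' : pvEntryMatch ["phd", "doctorate"] ed = false := by
        cases hq : pvEntryMatch ["phd", "doctorate"] ed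
        · rfl
        · exact absurd hq hb5
      by_cases hb4 : pvEntryMatch ["masters", "master's"] ed = true
      · have hMv : pvM ed = 4 := by simp [pvM, hb5', hb4]
        rw [hMv] at hM ⊢
        simp only [pvLevelNames, pvAboveO]
        rw [List.find?_cons_of_neg (by simp [hb5']), List.find?_cons_of_pos hb4,
            if_pos (show h < 5 by omega), if_pos (show h < 4 by omega)]
        norm_num
        cases hf5 : education.find? (pvEntryMatch ["phd", "doctorate"]) <;> simp
      · have hb4' : pvEntryMatch ["masters", "master's"] ed = false := by
          cases hq : pvEntryMatch ["masters", "master's"] ed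
          · rfl
          · exact absurd hq hb4
        by_cases hb3 : pvEntryMatch ["bachelor", "bachelor's"] ed = true
        · have hMv : pvM ed = 3 := by simp [pvM, hb5', hb4', hb3]
          rw [hMv] at hM ⊢
          simp only [pvLevelNames, pvAboveO]
          rw [List.find?_cons_of_neg (by simp [hb5']), List.find?_cons_of_neg (by simp [hb4']),
              List.find?_cons_of_pos hb3, if_pos (show h < 5 by omega),
              if_pos (show h < 4 by omega), if_pos (show h < 3 by omega)]
          norm_num
          cases hf5 : education.find? (pvEntryMatch ["phd", "doctorate"]) <;> simp <;>
          cases hf4 : education.find? (pvEntryMatch ["masters", "master's"]) <;> simp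
        · have hb3' : pvEntryMatch ["bachelor", "bachelor's"] ed = false := by
            cases hq : pvEntryMatch ["bachelor", "bachelor's"] ed
            · rfl
            · exact absurd hq hb3
          by_cases hb2 : pvEntryMatch ["associate"] ed = true
          · have hMv : pvM ed = 2 := by simp [pvM, hb5', hb4', hb3', hb2]
            rw [hMv] at hM ⊢
            simp only [pvLevelNames, pvAboveO]
            rw [List.find?_cons_of_neg (by simp [hb5']), List.find?_cons_of_neg (by simp [hb4']),
                List.find?_cons_of_neg (by simp [hb3']), List.find?_cons_of_pos hb2,
                if_pos (show h < 5 by omega), if_pos (show h < 4 by omega),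
                if_pos (show h < 3 by omega), if_pos (show h < 2 by omega)]
            norm_num
            cases hf5 : education.find? (pvEntryMatch ["phd", "doctorate"]) <;> simp <;>
            cases hf4 : education.find? (pvEntryMatch ["masters", "master's"]) <;> simp <;>
            cases hf3 : education.find? (pvEntryMatch ["bachelor", "bachelor's"]) <;> simp
          · have hb2' : pvEntryMatch ["associate"] ed = false := by
              cases hq : pvEntryMatch ["associate"] ed
              · rfl
              · exact absurd hq hb2
            by_cases hb1 : pvEntryMatch ["certificate"] ed = true
            · have hMv : pvM ed = 1 := by simp [pvM, hb5', hb4', hb3', hb2', hb1]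
              rw [hMv] at hM ⊢
              simp only [pvLevelNames, pvAboveO]
              rw [List.find?_cons_of_neg (by simp [hb5']), List.find?_cons_of_neg (by simp [hb4']),
                  List.find?_cons_of_neg (by simp [hb3']), List.find?_cons_of_neg (by simp [hb2']),
                  List.find?_cons_of_pos hb1, if_pos (show h < 5 by omega),
                  if_pos (show h < 4 by omega), if_pos (show h < 3 by omega),
                  if_pos (show h < 2 by omega), if_pos (show h < 1 by omega)]
              norm_num
              cases hf5 : education.find? (pvEntryMatch ["phd", "doctorate"]) <;> simp <;>
              cases hf4 : education.find? (pvEntryMatch ["masters", "master's"]) <;> simp <;>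
              cases hf3 : education.find? (pvEntryMatch ["bachelor", "bachelor's"]) <;> simp <;>
              cases hf2 : education.find? (pvEntryMatch ["associate"]) <;> simp
            · have hb1' : pvEntryMatch ["certificate"] ed = false := by
                cases hq : pvEntryMatch ["certificate"] ed
                · rfl
                · exact absurd hq hb1
              have : pvM ed = 0 := by simp [pvM, hb5', hb4', hb3', hb2', hb1']
              omega
  · rw [if_neg hM]
    apply pv_aboveO_cons_skip
    intro p hp hlt
    simp only [pvLevelNames, List.mem_cons, List.not_mem_nil, or_false] at hp
    rcases hp with h' | h' | h' | h' | h' <;> subst h' <;> norm_num at hlt ⊢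
    · cases hb : pvEntryMatch ["phd", "doctorate"] ed
      · rfl
      · exfalso; have := pv_le_pvM_5 ed hb; omega
    · cases hb : pvEntryMatch ["masters", "master's"] ed
      · rfl
      · exfalso; have := pv_le_pvM_4 ed hb; omega
    · cases hb : pvEntryMatch ["bachelor", "bachelor's"] ed
      · rfl
      · exfalso; have := pv_le_pvM_3 ed hb; omega
    · cases hb : pvEntryMatch ["associate"] ed
      · rfl
      · exfalso; have := pv_le_pvM_2 ed hb; omega
    · cases hb : pvEntryMatch ["certificate"] ed
      · rfl
      · exfalso; have := pv_le_pvM_1 ed hb; omega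

-- main invariant: A's fold from state (d, h) computes B's search above level h, defaulting to d
theorem pv_main (education : List (List (String × String))) :
    ∀ (d : Option String) (h : Int), 0 ≤ h →
      (education.foldl
        (fun (st : Option String × Int) ed =>
          let degree := PySem.Str.lower ((pvDictGet? ed "degree").getD "")
          pvDegreeHierarchy.foldl
            (fun st2 p =>
              if PySem.Str.isIn p.1 degree = true ∧ st2.2 < p.2 then (pvDictGet? ed "degree", p.2) else st2)
            st)
        (d, h)).1
      = (pvAboveO h education pvLevelNames).getD d := by
  induction education with
  | nil =>
    intro d h _
    rw [List.foldl_nil]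
    have hnone : pvAboveO h ([] : List (List (String × String))) pvLevelNames = none := by
      simp [pvLevelNames, pvAboveO, List.find?]
    rw [hnone]
    rfl
  | cons ed tl ih =>
    intro d h h0
    rw [List.foldl_cons]
    simp only []
    rw [pv_inner_step ed d h h0, pv_aboveO_cons ed tl h h0]
    by_cases hlt : h < pvM ed
    · rw [if_pos hlt, if_pos hlt, ih (pvDictGet? ed "degree") (pvM ed) (pvM_nonneg ed)]
      simp
    · rw [if_neg hlt, if_neg hlt, ih d h h0]

-- ===== VERDICT (by name: the statement is the Claim_ definition above) =====
theorem identify_highest_degree_py_spec : Claim_equal_identify_highest_degree_py := by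
  intro education _
  unfold Spec_identify_highest_degree_py identify_highest_degree_py
  rw [pv_main education none 0 le_rfl, pv_alt_eq_aboveO]
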